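-- pv_equiv track=rewrite | github.com/leehoon7/IE536_Project | main2.py | evaluate_schedule
-- ===== SOURCE A (Python) =====
-- def evaluate_schedule(groups, timetable, processing):
--
--     span = [0 for _ in groups]
--
--     for g_idx, group in enumerate(groups):
--         for idx, group_elem in enumerate(group):
--             span[g_idx] += processing[group_elem]
--             if idx < len(group) - 1:
--                 span[g_idx] += timetable[group[idx]][group[idx + 1]]
--
--     return span
-- ===== SOURCE B (Python) =====
-- def evaluate_schedule(groups, timetable, processing):
--     # Flatten all groups into one (owner, element) event stream, then two global passes:
--     # bucket-accumulate processing costs, then one scan over adjacent stream pairs adding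
--     # a transition only when both positions have the same owner (i.e. lie in the same group).
--     tagged = []
--     for g, group in enumerate(groups):
--         for e in group:
--             tagged.append((g, e))
--     span = [0] * len(groups)
--     for g, e in tagged:
--         span[g] += processing[e]
--     for (g1, a), (g2, b) in zip(tagged, tagged[1:]):
--         if g1 == g2:
--             span[g1] += timetable[a][b]
--     return span
-- ===== Notes on version B (the rewrite author's own statement) =====
-- stated objective: alternative
-- what changed: Instead of A's nested per-group loop with an index guard mutating span in place, B flattens all groups into a single (owner, element) event stream and then runs two global passes over that stream: a bucket accumulation of processing costs per owner, and one scan over adjacent stream pairs that adds a transition cost only when the two positions share an owner (owners are constant within a group and strictly increase across groups, so same-owner adjacent pairs are exactly the within-group adjacent pairs).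
import Mathlib
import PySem

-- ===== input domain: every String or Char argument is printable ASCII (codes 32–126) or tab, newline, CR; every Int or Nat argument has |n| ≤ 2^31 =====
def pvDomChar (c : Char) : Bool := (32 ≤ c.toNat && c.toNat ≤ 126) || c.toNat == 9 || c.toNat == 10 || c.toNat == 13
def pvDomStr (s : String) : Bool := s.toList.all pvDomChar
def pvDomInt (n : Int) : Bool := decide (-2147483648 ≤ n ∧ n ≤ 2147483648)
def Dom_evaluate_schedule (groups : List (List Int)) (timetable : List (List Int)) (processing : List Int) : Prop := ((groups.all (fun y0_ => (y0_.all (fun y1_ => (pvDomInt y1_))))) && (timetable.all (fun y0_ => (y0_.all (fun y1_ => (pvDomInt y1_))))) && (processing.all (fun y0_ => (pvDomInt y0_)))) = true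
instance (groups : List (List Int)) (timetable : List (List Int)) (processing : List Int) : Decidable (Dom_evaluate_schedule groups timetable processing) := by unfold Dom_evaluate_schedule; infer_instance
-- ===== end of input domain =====

-- B replaces A's nested per-group loop with an index guard by a flattened (owner, element)
-- event stream processed in two global passes (bucket processing sums, then one adjacent-pair
-- scan that adds a transition only when owners match). Objective: alternative; same asymptotic cost.

-- ===== PORT A =====
-- literal transliteration of A: span = [0 for _ in groups]; nested enumerate loops mutating span[g_idx]
def evaluate_schedule (groups : List (List Int)) (timetable : List (List Int)) (processing : List Int) : List Int :=
  let span := groups.map (fun _ => (0 : Int))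
  (PySem.List.enumerate groups).foldl (fun span gp =>
    let g_idx := gp.1
    let group := gp.2
    (PySem.List.enumerate group).foldl (fun span ie =>
      let idx := ie.1
      let group_elem := ie.2
      let span := PySem.List.pySetD span g_idx
        (PySem.List.pyGetD span g_idx 0 + PySem.List.pyGetD processing group_elem 0)
      if idx < (group.length : Int) - 1 then
        PySem.List.pySetD span g_idx
          (PySem.List.pyGetD span g_idx 0 +
            PySem.List.pyGetD
              (PySem.List.pyGetD timetable (PySem.List.pyGetD group idx 0) [])
              (PySem.List.pyGetD group (idx + 1) 0) 0)
      else span) span) span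

-- ===== PORT B =====
-- literal transliteration of B: build the tagged event stream, then the two global passes
def evaluate_schedule_alt (groups : List (List Int)) (timetable : List (List Int)) (processing : List Int) : List Int :=
  let tagged := (PySem.List.enumerate groups).foldl (fun tagged gp =>
    gp.2.foldl (fun tagged e => tagged ++ [(gp.1, e)]) tagged) []
  let span := List.replicate groups.length (0 : Int)
  let span := tagged.foldl (fun sp ge =>
    PySem.List.pySetD sp ge.1 (PySem.List.pyGetD sp ge.1 0 + PySem.List.pyGetD processing ge.2 0)) span
  let span := (tagged.zip (PySem.List.slice tagged (some 1) none)).foldl (fun sp pq =>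
    if pq.1.1 == pq.2.1 then
      PySem.List.pySetD sp pq.1.1 (PySem.List.pyGetD sp pq.1.1 0 +
        PySem.List.pyGetD (PySem.List.pyGetD timetable pq.1.2 []) pq.2.2 0)
    else sp) span
  span

-- ===== PRECONDITION & SPEC =====
-- Pre_ excludes exactly the inputs where A raises IndexError: some group element is an
-- out-of-range index into processing, or some adjacent pair indexes outside timetable / its row.
def Pre_evaluate_schedule (groups : List (List Int)) (timetable : List (List Int)) (processing : List Int) : Prop :=
  ∀ group ∈ groups,
    (∀ e ∈ group, PySem.Raise.InRange processing.length e) ∧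
    (∀ ab ∈ group.zip group.tail,
      PySem.Raise.InRange timetable.length ab.1 ∧
      PySem.Raise.InRange (PySem.List.pyGetD timetable ab.1 []).length ab.2)

instance (groups : List (List Int)) (timetable : List (List Int)) (processing : List Int) : Decidable (Pre_evaluate_schedule groups timetable processing) := by unfold Pre_evaluate_schedule; infer_instance

def pvWitness_evaluate_schedule : List (List Int) × List (List Int) × List Int :=
  ([[0, 1], [1], []], [[1, 2], [3, 4]], [10, 20])

def Spec_evaluate_schedule (groups : List (List Int)) (timetable : List (List Int)) (processing : List Int) (out : List Int) : Prop := out = evaluate_schedule_alt groups timetable processing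
instance (groups : List (List Int)) (timetable : List (List Int)) (processing : List Int) (out : List Int) : Decidable (Spec_evaluate_schedule groups timetable processing out) := by unfold Spec_evaluate_schedule; infer_instance

-- ===== CLAIM (what is proved, stated in full; the proofs are below) =====
def Claim_equal_evaluate_schedule : Prop := ∀ (groups : List (List Int)) (timetable : List (List Int)) (processing : List Int), Dom_evaluate_schedule groups timetable processing → Pre_evaluate_schedule groups timetable processing → Spec_evaluate_schedule groups timetable processing (evaluate_schedule groups timetable processing)

-- ===== LEMMAS AND PROOFS =====

-- per-group intended value: processing sum plus adjacent-pair transition sum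
def pvProc (pr : List Int) (g : List Int) : Int :=
  (g.map (fun e => PySem.List.pyGetD pr e 0)).sum

def pvTrans (tt : List (List Int)) (g : List Int) : Int :=
  ((g.zip g.tail).map (fun ab =>
    PySem.List.pyGetD (PySem.List.pyGetD tt ab.1 []) ab.2 0)).sum

def pvVal (tt : List (List Int)) (pr : List Int) (group : List Int) : Int :=
  pvProc pr group + pvTrans tt group

-- the tagged stream B builds: owner n for the first group, n+1 for the next, …
def pvTag : Nat → List (List Int) → List (Int × Int)
  | _, [] => []
  | n, g :: gs => g.map (fun e => ((n : Int), e)) ++ pvTag (n + 1) gs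

-- pass-2 fold with the previous stream element carried explicitly
def pvGo (tt : List (List Int)) : (Int × Int) → List (Int × Int) → List Int → List Int
  | _, [], s => s
  | x, y :: l, s =>
    pvGo tt y l
      (if x.1 == y.1 then
        PySem.List.pySetD s x.1 (PySem.List.pyGetD s x.1 0 +
          PySem.List.pyGetD (PySem.List.pyGetD tt x.2 []) y.2 0)
      else s)

theorem pvVal_nil (tt : List (List Int)) (pr : List Int) : pvVal tt pr [] = 0 := by
  simp [pvVal, pvProc, pvTrans]

theorem pvVal_singleton (tt : List (List Int)) (pr : List Int) (e : Int) :
    pvVal tt pr [e] = PySem.List.pyGetD pr e 0 := by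
  simp [pvVal, pvProc, pvTrans]

theorem pvVal_cons₂ (tt : List (List Int)) (pr : List Int) (a b : Int) (l : List Int) :
    pvVal tt pr (a :: b :: l) =
      PySem.List.pyGetD pr a 0 + PySem.List.pyGetD (PySem.List.pyGetD tt a []) b 0
        + pvVal tt pr (b :: l) := by
  simp [pvVal, pvProc, pvTrans]
  ring

theorem pvTrans_cons₂ (tt : List (List Int)) (a b : Int) (l : List Int) :
    pvTrans tt (a :: b :: l) =
      PySem.List.pyGetD (PySem.List.pyGetD tt a []) b 0 + pvTrans tt (b :: l) := by
  simp [pvTrans]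

-- ===== A-side: the nested loops compute map pvVal =====

-- the inner loop of A, over a suffix ys of the group starting at index pre.length,
-- adds pvVal ys to span[g]
theorem inner_aux (tt : List (List Int)) (pr : List Int) (g : Nat) (group : List Int) :
    ∀ (ys pre : List Int) (span : List Int), group = pre ++ ys → g < span.length →
    (PySem.List.enumerate ys (pre.length : Int)).foldl
      (fun span ie =>
        let idx := ie.1
        let group_elem := ie.2
        let span := PySem.List.pySetD span (g : Int)
          (PySem.List.pyGetD span (g : Int) 0 + PySem.List.pyGetD pr group_elem 0)
        if idx < (group.length : Int) - 1 then
          PySem.List.pySetD span (g : Int)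
            (PySem.List.pyGetD span (g : Int) 0 +
              PySem.List.pyGetD
                (PySem.List.pyGetD tt (PySem.List.pyGetD group idx 0) [])
                (PySem.List.pyGetD group (idx + 1) 0) 0)
        else span) span
    = span.set g (span.getD g 0 + pvVal tt pr ys) := by
  intro ys
  induction ys with
  | nil =>
    intro pre span hsplit hg
    simp [PySem.List.enumerate, pvVal_nil, List.getElem?_eq_getElem hg,
      List.set_getElem_self hg]
  | cons e ys' ih =>
    intro pre span hsplit hg
    rw [PySem.List.enumerate_cons]
    simp only [List.foldl_cons]
    cases ys' with
    | nil =>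
      have hcond : ¬ ((pre.length : Int) < (group.length : Int) - 1) := by
        rw [hsplit]; simp
      simp [PySem.List.enumerate_nil, hcond, pvVal_singleton,
        List.getD_eq_getElem?_getD, List.getElem?_eq_getElem hg]
    | cons y ys'' =>
      have hcond : ((pre.length : Int) < (group.length : Int) - 1) := by
        rw [hsplit]; simp; omega
      have hgete : PySem.List.pyGetD group ((pre.length : Int)) 0 = e := by
        rw [hsplit]; simp [List.getD_eq_getElem?_getD]
      have hgety : PySem.List.pyGetD group ((pre.length : Int) + 1) 0 = y := by
        rw [hsplit]
        have h1 : ((pre.length : Int) + 1) = (((pre ++ [e]).length : Nat) : Int) := by simp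
        have h2 : pre ++ e :: y :: ys'' = (pre ++ [e]) ++ y :: ys'' := by simp
        rw [h1, PySem.List.pyGetD_natCast, h2]
        simp [List.getD_eq_getElem?_getD]
      simp only [hgete, hgety, if_pos hcond, PySem.List.pySetD_natCast,
        PySem.List.pyGetD_natCast]
      have hstep : ∀ v : Int, ((span.set g v).getD g 0) = v := by
        intro v
        simp [List.getD_eq_getElem?_getD, List.getElem?_set_self', List.getElem?_eq_getElem hg]
      rw [hstep, List.set_set]
      have hsplit' : group = (pre ++ [e]) ++ y :: ys'' := by rw [hsplit]; simp
      have hg' : g < (span.set g (span.getD g 0 + PySem.List.pyGetD pr e 0 +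
          PySem.List.pyGetD (PySem.List.pyGetD tt e []) y 0)).length := by simpa using hg
      have ih' := ih (pre ++ [e])
        (span.set g (span.getD g 0 + PySem.List.pyGetD pr e 0 +
          PySem.List.pyGetD (PySem.List.pyGetD tt e []) y 0)) hsplit' hg'
      simp only [PySem.List.pySetD_natCast, PySem.List.pyGetD_natCast] at ih'
      have hstart : ((pre.length : Int) + 1) = (((pre ++ [e]).length : Nat) : Int) := by simp
      rw [hstart, ih', hstep, List.set_set, pvVal_cons₂]
      congr 1
      ring

-- the outer loop, over a suffix gs of groups starting at index pre.length,
-- fills positions pre.length.. with the per-group values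
theorem outer_aux (tt : List (List Int)) (pr : List Int) :
    ∀ (gs : List (List Int)) (pre : List Int),
    (PySem.List.enumerate gs (pre.length : Int)).foldl
      (fun span gp =>
        let g_idx := gp.1
        let group := gp.2
        (PySem.List.enumerate group).foldl
          (fun span ie =>
            let idx := ie.1
            let group_elem := ie.2
            let span := PySem.List.pySetD span g_idx
              (PySem.List.pyGetD span g_idx 0 + PySem.List.pyGetD pr group_elem 0)
            if idx < (group.length : Int) - 1 then
              PySem.List.pySetD span g_idx
                (PySem.List.pyGetD span g_idx 0 +
                  PySem.List.pyGetD
                    (PySem.List.pyGetD tt (PySem.List.pyGetD group idx 0) [])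
                    (PySem.List.pyGetD group (idx + 1) 0) 0)
            else span) span)
      (pre ++ gs.map (fun _ => (0 : Int)))
    = pre ++ gs.map (pvVal tt pr) := by
  intro gs
  induction gs with
  | nil => intro pre; simp [PySem.List.enumerate_nil]
  | cons group gs' ih =>
    intro pre
    rw [PySem.List.enumerate_cons]
    simp only [List.foldl_cons, List.map_cons]
    have hg : pre.length < (pre ++ (0 : Int) :: gs'.map (fun _ => (0 : Int))).length := by
      simp
    have hinner := inner_aux tt pr pre.length group group []
      (pre ++ (0 : Int) :: gs'.map (fun _ => (0 : Int))) (by simp) hg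
    simp only [List.length_nil, Nat.cast_zero] at hinner
    rw [hinner]
    have hgetD : (pre ++ (0 : Int) :: gs'.map (fun _ => (0 : Int))).getD pre.length 0 = 0 := by
      simp [List.getD_eq_getElem?_getD]
    have hset : (pre ++ (0 : Int) :: gs'.map (fun _ => (0 : Int))).set pre.length
        (pvVal tt pr group) = (pre ++ [pvVal tt pr group]) ++ gs'.map (fun _ => (0 : Int)) := by
      rw [List.set_append_right _ _ (Nat.le_refl _)]
      simp
    rw [hgetD, zero_add, hset]
    have hlen : ((pre.length : Int) + 1) = (((pre ++ [pvVal tt pr group]).length : Nat) : Int) := by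
      simp
    rw [hlen, ih (pre ++ [pvVal tt pr group])]
    simp

-- ===== B-side: the tagged stream and the two passes =====

-- building the stream: the nested append loops produce pvTag
theorem tag_build (gs : List (List Int)) :
    ∀ (n : Nat) (acc : List (Int × Int)),
    (PySem.List.enumerate gs (n : Int)).foldl (fun tagged gp =>
      gp.2.foldl (fun tagged e => tagged ++ [(gp.1, e)]) tagged) acc
    = acc ++ pvTag n gs := by
  induction gs with
  | nil => intro n acc; simp [PySem.List.enumerate_nil, pvTag]
  | cons g gs' ih =>
    intro n acc
    rw [PySem.List.enumerate_cons]
    simp only [List.foldl_cons]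
    rw [PySem.List.foldl_append_singleton_eq_map]
    have hcast : ((n : Int) + 1) = (((n + 1 : Nat)) : Int) := by push_cast; ring_nf
    rw [hcast, ih (n + 1)]
    simp [pvTag]

-- pass 1 over one constant-owner block adds the block's processing sum at index n
theorem pass1_block (pr : List Int) (n : Nat) :
    ∀ (g : List Int) (s : List Int), n < s.length →
    (g.map (fun e => ((n : Int), e))).foldl (fun sp ge =>
      PySem.List.pySetD sp ge.1 (PySem.List.pyGetD sp ge.1 0 + PySem.List.pyGetD pr ge.2 0)) s
    = s.set n (s.getD n 0 + pvProc pr g) := by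
  intro g
  induction g with
  | nil =>
    intro s hn
    simp [pvProc, List.getD_eq_getElem?_getD, List.getElem?_eq_getElem hn,
      List.set_getElem_self hn]
  | cons e g' ih =>
    intro s hn
    simp only [List.map_cons, List.foldl_cons, PySem.List.pySetD_natCast,
      PySem.List.pyGetD_natCast]
    have hn' : n < (s.set n (s.getD n 0 + PySem.List.pyGetD pr e 0)).length := by simpa using hn
    rw [ih _ hn']
    have hstep : ((s.set n (s.getD n 0 + PySem.List.pyGetD pr e 0)).getD n 0)
        = s.getD n 0 + PySem.List.pyGetD pr e 0 := by
      simp [List.getD_eq_getElem?_getD, List.getElem?_set_self', List.getElem?_eq_getElem hn]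
    rw [hstep, List.set_set]
    simp [pvProc]
    ring_nf

-- pass 1 over the whole stream produces the per-group processing sums
theorem pass1_aux (pr : List Int) :
    ∀ (gs : List (List Int)) (pre : List Int),
    (pvTag pre.length gs).foldl (fun sp ge =>
      PySem.List.pySetD sp ge.1 (PySem.List.pyGetD sp ge.1 0 + PySem.List.pyGetD pr ge.2 0))
      (pre ++ List.replicate gs.length (0 : Int))
    = pre ++ gs.map (pvProc pr) := by
  intro gs
  induction gs with
  | nil => intro pre; simp [pvTag]
  | cons g gs' ih =>
    intro pre
    simp only [pvTag, List.foldl_append, List.length_cons, List.replicate_succ, List.map_cons]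
    have hn : pre.length < (pre ++ (0 : Int) :: List.replicate gs'.length (0 : Int)).length := by
      simp
    rw [pass1_block pr pre.length g _ hn]
    have hgetD : (pre ++ (0 : Int) :: List.replicate gs'.length (0 : Int)).getD pre.length 0 = 0 := by
      simp [List.getD_eq_getElem?_getD]
    have hset : (pre ++ (0 : Int) :: List.replicate gs'.length (0 : Int)).set pre.length
        (pvProc pr g) = (pre ++ [pvProc pr g]) ++ List.replicate gs'.length (0 : Int) := by
      rw [List.set_append_right _ _ (Nat.le_refl _)]
      simp
    rw [hgetD, zero_add, hset]
    have hlen : pre.length + 1 = (pre ++ [pvProc pr g]).length := by simp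
    rw [hlen, ih (pre ++ [pvProc pr g])]
    simp

-- the zip-with-tail fold is the carried-previous fold pvGo
theorem zip_tail_go (tt : List (List Int)) :
    ∀ (l : List (Int × Int)) (x : Int × Int) (s : List Int),
    ((x :: l).zip l).foldl (fun sp pq =>
      if pq.1.1 == pq.2.1 then
        PySem.List.pySetD sp pq.1.1 (PySem.List.pyGetD sp pq.1.1 0 +
          PySem.List.pyGetD (PySem.List.pyGetD tt pq.1.2 []) pq.2.2 0)
      else sp) s
    = pvGo tt x l s := by
  intro l
  induction l with
  | nil => intro x s; simp [pvGo]
  | cons y l' ih =>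
    intro x s
    simp only [List.zip_cons_cons, List.foldl_cons, pvGo]
    exact ih y _

-- pvGo over an append carries the last element of the first part
theorem pvGo_append (tt : List (List Int)) :
    ∀ (A B : List (Int × Int)) (x : Int × Int) (s : List Int),
    pvGo tt x (A ++ B) s = pvGo tt (A.getLastD x) B (pvGo tt x A s) := by
  intro A
  induction A with
  | nil => intro B x s; simp [pvGo]
  | cons a A' ih =>
    intro B x s
    simp only [List.cons_append, pvGo, List.getLastD_cons]
    exact ih B a _

-- the carried owner coming out of a constant-owner block is that owner
theorem getLastD_fst (n : Nat) :
    ∀ (g : List Int) (e : Int),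
    ((g.map (fun y => ((n : Int), y))).getLastD ((n : Int), e)).1 = (n : Int) := by
  intro g
  induction g with
  | nil => intro e; simp
  | cons y g' ih =>
    intro e
    simp only [List.map_cons, List.getLastD_cons]
    exact ih y

-- pass 2 within one constant-owner block adds the block's transition sum at index n
theorem pass2_block (tt : List (List Int)) (n : Nat) :
    ∀ (g : List Int) (e : Int) (s : List Int), n < s.length →
    pvGo tt ((n : Int), e) (g.map (fun y => ((n : Int), y))) s
    = s.set n (s.getD n 0 + pvTrans tt (e :: g)) := by
  intro g
  induction g with
  | nil =>
    intro e s hn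
    simp [pvGo, pvTrans, List.getD_eq_getElem?_getD, List.getElem?_eq_getElem hn,
      List.set_getElem_self hn]
  | cons y g' ih =>
    intro e s hn
    simp only [List.map_cons, pvGo, beq_self_eq_true, if_pos, PySem.List.pySetD_natCast,
      PySem.List.pyGetD_natCast]
    have hn' : n < (s.set n (s.getD n 0 +
        PySem.List.pyGetD (PySem.List.pyGetD tt e []) y 0)).length := by simpa using hn
    rw [ih y _ hn']
    have hstep : ((s.set n (s.getD n 0 +
        PySem.List.pyGetD (PySem.List.pyGetD tt e []) y 0)).getD n 0)
        = s.getD n 0 + PySem.List.pyGetD (PySem.List.pyGetD tt e []) y 0 := by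
      simp [List.getD_eq_getElem?_getD, List.getElem?_set_self', List.getElem?_eq_getElem hn]
    rw [hstep, List.set_set, pvTrans_cons₂]
    rw [add_assoc]

-- pass 2 from a nonempty first block onward turns processing sums into full span values
theorem pass2_main (tt : List (List Int)) (pr : List Int) :
    ∀ (gs : List (List Int)) (pre : List Int) (x : Int × Int), x.1 < (pre.length : Int) →
    pvGo tt x (pvTag pre.length gs) (pre ++ gs.map (pvProc pr))
    = pre ++ gs.map (pvVal tt pr) := by
  intro gs
  induction gs with
  | nil => intro pre x _; simp [pvTag, pvGo]
  | cons g gs' ih =>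
    intro pre x hx
    cases g with
    | nil =>
      have h0 : pvProc pr [] = 0 := by simp [pvProc]
      have h1 : pvVal tt pr [] = 0 := pvVal_nil tt pr
      simp only [pvTag, List.map_nil, List.nil_append, List.map_cons, h0, h1]
      have hre : pre ++ (0 : Int) :: gs'.map (pvProc pr)
          = (pre ++ [(0 : Int)]) ++ gs'.map (pvProc pr) := by simp
      have hre' : pre ++ (0 : Int) :: gs'.map (pvVal tt pr)
          = (pre ++ [(0 : Int)]) ++ gs'.map (pvVal tt pr) := by simp
      rw [hre, hre']
      have hlen : pre.length + 1 = (pre ++ [(0 : Int)]).length := by simp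
      rw [hlen]
      exact ih (pre ++ [(0 : Int)]) x (by simp; omega)
    | cons e g' =>
      simp only [pvTag, List.map_cons, List.cons_append]
      -- first step: boundary pair (x, (n, e)) is a no-op since x.1 < n
      have hne : (x.1 == (pre.length : Int)) = false := by
        simp only [beq_eq_false_iff_ne]; omega
      simp only [pvGo, hne, Bool.false_eq_true, if_false]
      rw [pvGo_append]
      have hn : pre.length < (pre ++ pvProc pr (e :: g') :: gs'.map (pvProc pr)).length := by
        simp
      rw [pass2_block tt pre.length g' e _ hn]
      have hgetD : (pre ++ pvProc pr (e :: g') :: gs'.map (pvProc pr)).getD pre.length 0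
          = pvProc pr (e :: g') := by
        simp [List.getD_eq_getElem?_getD]
      have hset : (pre ++ pvProc pr (e :: g') :: gs'.map (pvProc pr)).set pre.length
          (pvProc pr (e :: g') + pvTrans tt (e :: g'))
          = (pre ++ [pvVal tt pr (e :: g')]) ++ gs'.map (pvProc pr) := by
        rw [List.set_append_right _ _ (Nat.le_refl _)]
        simp [pvVal]
      rw [hgetD, hset]
      have hlen : pre.length + 1 = (pre ++ [pvVal tt pr (e :: g')]).length := by simp
      rw [hlen]
      have hcar : ((g'.map (fun y => ((pre.length : Int), y))).getLastD
          ((pre.length : Int), e)).1 < ((pre ++ [pvVal tt pr (e :: g')]).length : Int) := by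
        rw [getLastD_fst]
        simp
      have := ih (pre ++ [pvVal tt pr (e :: g')]) _ hcar
      rw [this]
      simp

-- pass 2 over the whole stream (no carried element yet)
theorem pass2_top (tt : List (List Int)) (pr : List Int) :
    ∀ (gs : List (List Int)) (pre : List Int),
    (let tagged := pvTag pre.length gs
     (tagged.zip (PySem.List.slice tagged (some 1) none)).foldl (fun sp pq =>
       if pq.1.1 == pq.2.1 then
         PySem.List.pySetD sp pq.1.1 (PySem.List.pyGetD sp pq.1.1 0 +
           PySem.List.pyGetD (PySem.List.pyGetD tt pq.1.2 []) pq.2.2 0)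
       else sp) (pre ++ gs.map (pvProc pr)))
    = pre ++ gs.map (pvVal tt pr) := by
  intro gs
  induction gs with
  | nil => intro pre; simp [pvTag]
  | cons g gs' ih =>
    intro pre
    cases g with
    | nil =>
      have h0 : pvProc pr [] = 0 := by simp [pvProc]
      have h1 : pvVal tt pr [] = 0 := pvVal_nil tt pr
      simp only [pvTag, List.map_nil, List.nil_append, List.map_cons, h0, h1]
      have hre : pre ++ (0 : Int) :: gs'.map (pvProc pr)
          = (pre ++ [(0 : Int)]) ++ gs'.map (pvProc pr) := by simp
      have hre' : pre ++ (0 : Int) :: gs'.map (pvVal tt pr)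
          = (pre ++ [(0 : Int)]) ++ gs'.map (pvVal tt pr) := by simp
      rw [hre, hre']
      have hlen : pre.length + 1 = (pre ++ [(0 : Int)]).length := by simp
      rw [hlen]
      exact ih (pre ++ [(0 : Int)])
    | cons e g' =>
      simp only [pvTag, List.map_cons, List.cons_append, PySem.List.slice_from_one,
        List.tail_cons]
      rw [zip_tail_go]
      rw [pvGo_append]
      have hn : pre.length < (pre ++ pvProc pr (e :: g') :: gs'.map (pvProc pr)).length := by
        simp
      rw [pass2_block tt pre.length g' e _ hn]
      have hgetD : (pre ++ pvProc pr (e :: g') :: gs'.map (pvProc pr)).getD pre.length 0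
          = pvProc pr (e :: g') := by
        simp [List.getD_eq_getElem?_getD]
      have hset : (pre ++ pvProc pr (e :: g') :: gs'.map (pvProc pr)).set pre.length
          (pvProc pr (e :: g') + pvTrans tt (e :: g'))
          = (pre ++ [pvVal tt pr (e :: g')]) ++ gs'.map (pvProc pr) := by
        rw [List.set_append_right _ _ (Nat.le_refl _)]
        simp [pvVal]
      rw [hgetD, hset]
      have hlen : pre.length + 1 = (pre ++ [pvVal tt pr (e :: g')]).length := by simp
      rw [hlen]
      have hcar : ((g'.map (fun y => ((pre.length : Int), y))).getLastD
          ((pre.length : Int), e)).1 < ((pre ++ [pvVal tt pr (e :: g')]).length : Int) := by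
        rw [getLastD_fst]
        simp
      have := pass2_main tt pr gs' (pre ++ [pvVal tt pr (e :: g')]) _ hcar
      rw [this]
      simp

-- B computes map pvVal
theorem alt_eq_map (groups tt pr : _) :
    evaluate_schedule_alt groups tt pr = groups.map (pvVal tt pr) := by
  unfold evaluate_schedule_alt
  have htag := tag_build groups 0 []
  simp only [Nat.cast_zero, List.nil_append] at htag
  have h1 := pass1_aux pr groups []
  simp only [List.length_nil, List.nil_append] at h1
  have h2 := pass2_top tt pr groups []
  simp only [List.length_nil, List.nil_append] at h2
  simp only [htag, h1, h2]

-- ===== VERDICT (by name: the statement is the Claim_ definition above) =====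
theorem evaluate_schedule_spec : Claim_equal_evaluate_schedule := by
  intro groups tt pr _ _
  unfold Spec_evaluate_schedule evaluate_schedule
  rw [alt_eq_map]
  have h := outer_aux tt pr groups []
  simpa using h
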